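-- pv_equiv track=rewrite | github.com/rwu527/SpaceExpander | src/nest.py | sort_mcs_mapping
-- ===== SOURCE A (Python) =====
-- from collections import Counter, defaultdict
--
-- def sort_mcs_mapping(mcs_mapping):
--     """
--     Sorts the mcs_mapping dictionary by the core structure of each mcs_smiles,
--     where the core is defined as the mcs_smiles with '*' characters removed.
--
--     This reorders entries so that structurally equivalent cores (ignoring attachment points)
--     are grouped together in the output. The structure and values remain unchanged.
--     """
--
--     grouped = defaultdict(list)
--
--     # Group by core (mcs_smiles without asterisks)
--     for mcs_smiles, data in mcs_mapping.items():
--         core_smiles = mcs_smiles.replace('*', '')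
--         grouped[core_smiles].append((mcs_smiles, data))
--
--     # Sort by core SMILES string and reconstruct the mapping in that order
--     sorted_mapping = {}
--     for core in sorted(grouped.keys()):
--         for mcs_smiles, data in grouped[core]:
--             sorted_mapping[mcs_smiles] = data  # Preserve original keys and values
--
--     return sorted_mapping
-- ===== SOURCE B (Python) =====
-- def sort_mcs_mapping(mcs_mapping):
--     # Selection-by-group: repeatedly find the smallest remaining core and emit all
--     # entries sharing it (in original order), removing them from the work list.
--     # No grouping index and no sort call are used.
--     result = {}
--     remaining = list(mcs_mapping.items())
--     while remaining:
--         mn = min(kv[0].replace('*', '') for kv in remaining)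
--         rest = []
--         for kv in remaining:
--             if kv[0].replace('*', '') == mn:
--                 result[kv[0]] = kv[1]
--             else:
--                 rest.append(kv)
--         remaining = rest
--     return result
-- ===== Notes on version B (the rewrite author's own statement) =====
-- stated objective: alternative
-- what changed: Replaced the defaultdict grouping index plus sorted-keys reconstruction by a selection loop with no sort call and no index: repeatedly find the minimum asterisk-stripped core among the remaining entries, emit all entries sharing it in original order, and recurse on the rest.
import Mathlib
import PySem

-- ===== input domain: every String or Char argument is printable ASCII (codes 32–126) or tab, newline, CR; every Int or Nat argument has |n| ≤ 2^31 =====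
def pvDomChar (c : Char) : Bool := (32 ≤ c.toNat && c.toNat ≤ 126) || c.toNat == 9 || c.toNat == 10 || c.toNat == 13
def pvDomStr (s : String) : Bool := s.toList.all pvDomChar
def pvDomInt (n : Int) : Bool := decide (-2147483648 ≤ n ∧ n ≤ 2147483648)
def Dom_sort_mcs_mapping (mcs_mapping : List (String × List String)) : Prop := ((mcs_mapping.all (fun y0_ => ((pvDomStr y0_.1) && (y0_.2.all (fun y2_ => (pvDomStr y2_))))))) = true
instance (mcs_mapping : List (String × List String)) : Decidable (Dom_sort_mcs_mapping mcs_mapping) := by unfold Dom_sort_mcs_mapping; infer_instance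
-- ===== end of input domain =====

-- B replaces A's defaultdict-grouping + sorted-keys reconstruction by a selection loop:
-- repeatedly emit all remaining entries sharing the minimum asterisk-stripped core; no
-- grouping index and no sort call (objective: alternative).


-- ===== PORT A =====
-- mcs_smiles.replace('*', '')
def pvCore (s : String) : String := PySem.Str.replace s "*" ""

def sort_mcs_mapping (mcs_mapping : List (String × List String)) : List (String × List String) :=
  -- grouped = defaultdict(list); for mcs_smiles, data in mcs_mapping.items(): grouped[core_smiles].append((mcs_smiles, data))
  let grouped : PySem.Dict String (List (String × List String)) :=
    mcs_mapping.foldl (fun d p => d.modify (pvCore p.1) [] (fun l => l ++ [p])) PySem.Dict.empty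
  -- sorted_mapping = {}; for core in sorted(grouped.keys()): for mcs_smiles, data in grouped[core]: sorted_mapping[mcs_smiles] = data
  let sorted_mapping : PySem.Dict String (List String) :=
    (PySem.List.sorted grouped.keys (fun c => c)).foldl
      (fun acc c => (grouped.getD c []).foldl (fun acc2 p => acc2.insert p.1 p.2) acc)
      PySem.Dict.empty
  sorted_mapping.items

-- ===== PORT B =====
-- while remaining: mn = min(kv[0].replace('*','') for kv in remaining);
--   for kv in remaining: emit into result if its core == mn else keep in rest; remaining = rest
def pvAltLoop (remaining : List (String × List String))
    (result : PySem.Dict String (List String)) : PySem.Dict String (List String) :=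
  match h : PySem.List.min? (remaining.map (fun kv => pvCore kv.1)) (fun c => c) with
  | none => result
  | some mn =>
      pvAltLoop (remaining.filter (fun kv => !(pvCore kv.1 == mn)))
        ((remaining.filter (fun kv => pvCore kv.1 == mn)).foldl
          (fun d p => d.insert p.1 p.2) result)
termination_by remaining.length
decreasing_by
  rcases List.mem_map.mp (PySem.List.min?_mem h) with ⟨kv, hkv, hc⟩
  have hlen : (remaining.filter (fun kv => !(pvCore kv.1 == mn))).length < remaining.length := by
    refine List.length_filter_lt_length_iff_exists.mpr ⟨kv, hkv, ?_⟩
    simp [hc]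
  simp only [List.length_unattach]
  rw [← List.countP_eq_length_filter] at hlen ⊢
  rw [List.countP_attach (l := remaining) (p := fun kv => !(pvCore kv.1 == mn))]
  exact hlen

def sort_mcs_mapping_alt (mcs_mapping : List (String × List String)) : List (String × List String) :=
  (pvAltLoop mcs_mapping PySem.Dict.empty).items

-- ===== PRECONDITION & SPEC =====
-- The argument is a Python dict, whose keys are necessarily pairwise distinct; Pre_ states
-- exactly that for its association-list representation (no dict input is excluded).
def Pre_sort_mcs_mapping (mcs_mapping : List (String × List String)) : Prop :=
  (mcs_mapping.map Prod.fst).Nodup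
instance (mcs_mapping : List (String × List String)) : Decidable (Pre_sort_mcs_mapping mcs_mapping) := by unfold Pre_sort_mcs_mapping; infer_instance

def pvWitness_sort_mcs_mapping : (List (String × List String)) := [("*C", ["a", "b"]), ("B*", []), ("C", ["x"])]

def Spec_sort_mcs_mapping (mcs_mapping : List (String × List String)) (out : List (String × List String)) : Prop := out = sort_mcs_mapping_alt mcs_mapping
instance (mcs_mapping : List (String × List String)) (out : List (String × List String)) : Decidable (Spec_sort_mcs_mapping mcs_mapping out) := by unfold Spec_sort_mcs_mapping; infer_instance

-- ===== CLAIM (what is proved, stated in full; the proofs are below) =====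
def Claim_equal_sort_mcs_mapping : Prop := ∀ (mcs_mapping : List (String × List String)), Dom_sort_mcs_mapping mcs_mapping → Pre_sort_mcs_mapping mcs_mapping → Spec_sort_mcs_mapping mcs_mapping (sort_mcs_mapping mcs_mapping)

-- ===== LEMMAS AND PROOFS =====

-- the canonical form both programs are reduced to: the strictly-sorted distinct cores,
-- each expanded to its entries in original order
def pvCanon (m : List (String × List String)) : List (String × List String) :=
  (PySem.List.sorted (PySem.Set.ofList (m.map (fun kv => pvCore kv.1))) (fun c => c)).flatMap
    (fun c => m.filter (fun p => pvCore p.1 == c))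

-- B's emission order, without the result dict
def pvSel (remaining : List (String × List String)) : List (String × List String) :=
  match h : PySem.List.min? (remaining.map (fun kv => pvCore kv.1)) (fun c => c) with
  | none => []
  | some mn =>
      remaining.filter (fun kv => pvCore kv.1 == mn) ++
        pvSel (remaining.filter (fun kv => !(pvCore kv.1 == mn)))
termination_by remaining.length
decreasing_by
  rcases List.mem_map.mp (PySem.List.min?_mem h) with ⟨kv, hkv, hc⟩
  have hlen : (remaining.filter (fun kv => !(pvCore kv.1 == mn))).length < remaining.length := by
    refine List.length_filter_lt_length_iff_exists.mpr ⟨kv, hkv, ?_⟩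
    simp [hc]
  simp only [List.length_unattach]
  rw [← List.countP_eq_length_filter] at hlen ⊢
  rw [List.countP_attach (l := remaining) (p := fun kv => !(pvCore kv.1 == mn))]
  exact hlen

-- pvAltLoop is the insert-fold of its emission order
theorem pv_filter_core_lt (r : List (String × List String)) (mn : String)
    (h : PySem.List.min? (r.map (fun kv => pvCore kv.1)) (fun c => c) = some mn) :
    (r.filter (fun kv => !(pvCore kv.1 == mn))).length < r.length := by
  rcases List.mem_map.mp (PySem.List.min?_mem h) with ⟨kv, hkv, hc⟩
  refine List.length_filter_lt_length_iff_exists.mpr ⟨kv, hkv, ?_⟩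
  simp [hc]

theorem pvAltLoop_none (r : List (String × List String)) (d : PySem.Dict String (List String))
    (h : PySem.List.min? (r.map (fun kv => pvCore kv.1)) (fun c => c) = none) :
    pvAltLoop r d = d := by
  rw [pvAltLoop]
  split
  · rfl
  · rename_i mn hm
    rw [h] at hm
    cases hm

theorem pvAltLoop_some (r : List (String × List String)) (d : PySem.Dict String (List String))
    (mn : String)
    (h : PySem.List.min? (r.map (fun kv => pvCore kv.1)) (fun c => c) = some mn) :
    pvAltLoop r d =
      pvAltLoop (r.filter (fun kv => !(pvCore kv.1 == mn)))
        ((r.filter (fun kv => pvCore kv.1 == mn)).foldl (fun d p => d.insert p.1 p.2) d) := by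
  rw [pvAltLoop]
  split
  · rename_i h0
    rw [h] at h0
    cases h0
  · rename_i mn' hm
    rw [h] at hm
    cases hm
    rfl

theorem pvSel_none (r : List (String × List String))
    (h : PySem.List.min? (r.map (fun kv => pvCore kv.1)) (fun c => c) = none) :
    pvSel r = [] := by
  rw [pvSel]
  split
  · rfl
  · rename_i mn hm
    rw [h] at hm
    cases hm

theorem pvSel_some (r : List (String × List String)) (mn : String)
    (h : PySem.List.min? (r.map (fun kv => pvCore kv.1)) (fun c => c) = some mn) :
    pvSel r = r.filter (fun kv => pvCore kv.1 == mn) ++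
      pvSel (r.filter (fun kv => !(pvCore kv.1 == mn))) := by
  rw [pvSel]
  split
  · rename_i h0
    rw [h] at h0
    cases h0
  · rename_i mn' hm
    rw [h] at hm
    cases hm
    rfl

theorem pvAltLoop_eq_sel_aux : ∀ (n : Nat) (r : List (String × List String))
    (d : PySem.Dict String (List String)), r.length ≤ n →
    pvAltLoop r d = (pvSel r).foldl (fun d p => d.insert p.1 p.2) d := by
  intro n
  induction n with
  | zero =>
    intro r d hle
    have hr : r = [] := List.length_eq_zero_iff.mp (Nat.le_zero.mp hle)
    subst hr
    rw [pvAltLoop_none _ _ rfl, pvSel_none _ rfl]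
    rfl
  | succ n ih =>
    intro r d hle
    cases hm : PySem.List.min? (r.map (fun kv => pvCore kv.1)) (fun c => c) with
    | none => rw [pvAltLoop_none _ _ hm, pvSel_none _ hm]; rfl
    | some mn =>
      rw [pvAltLoop_some _ _ _ hm, pvSel_some _ _ hm]
      simp only [List.foldl_append]
      exact ih _ _ (by have := pv_filter_core_lt r mn hm; omega)

theorem pvAltLoop_eq_sel (r : List (String × List String)) (d : PySem.Dict String (List String)) :
    pvAltLoop r d = (pvSel r).foldl (fun d p => d.insert p.1 p.2) d :=
  pvAltLoop_eq_sel_aux r.length r d le_rfl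

-- insertBy passes over a prefix it does not go before
theorem pv_insertBy_append_not {α : Type} (before : α → α → Bool) (x : α) (pre l : List α)
    (h : ∀ y ∈ pre, before x y = false) :
    PySem.List.insertBy before x (pre ++ l) = pre ++ PySem.List.insertBy before x l := by
  induction pre with
  | nil => simp
  | cons a t ih =>
    have ha : before x a = false := h a (by simp)
    simp only [List.cons_append, PySem.List.insertBy, ha]
    simp [ih (fun y hy => h y (by simp [hy]))]

-- insertBy goes in front of a list it precedes entirely
theorem pv_insertBy_all {α : Type} (before : α → α → Bool) (x : α) (l : List α)
    (h : ∀ y ∈ l, before x y = true) :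
    PySem.List.insertBy before x l = x :: l := by
  cases l with
  | nil => rfl
  | cons a t => simp [PySem.List.insertBy, h a (by simp)]

-- sorted(xs ++ [x]) is insertBy into sorted(xs)
theorem pv_sorted_append {α κ : Type} [LT κ] [DecidableLT κ] (xs : List α) (x : α) (key : α → κ) :
    PySem.List.sorted (xs ++ [x]) key =
      PySem.List.insertBy (fun a b => decide (key a < key b)) x (PySem.List.sorted xs key) := by
  rw [PySem.List.sorted_eq_foldl_insertBy, PySem.List.sorted_eq_foldl_insertBy, List.foldl_append]
  rfl

-- inserting x whose key already occurs in S appends it to its group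
theorem pv_insert_flat_mem {α κ : Type} [LinearOrder κ] (key : α → κ) (x : α)
    (S : List κ) (G : κ → List α)
    (hS : S.Pairwise (· < ·)) (hG : ∀ c ∈ S, ∀ p ∈ G c, key p = c) (hmem : key x ∈ S) :
    PySem.List.insertBy (fun a b => decide (key a < key b)) x (S.flatMap G) =
      S.flatMap (fun c => G c ++ if key x = c then [x] else []) := by
  induction S with
  | nil => simp at hmem
  | cons c S' ih =>
    have hpre : ∀ p ∈ G c, key p = c := hG c (by simp)
    have hSt : S'.Pairwise (· < ·) := (List.pairwise_cons.mp hS).2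
    have hlt : ∀ c' ∈ S', c < c' := (List.pairwise_cons.mp hS).1
    rcases List.mem_cons.mp hmem with hc | hc
    · -- key x = c : skip G c, then x precedes everything after
      have hnot : ∀ y ∈ G c, (decide (key x < key y)) = false := by
        intro y hy; simp [hpre y hy, hc]
      have hall : ∀ y ∈ S'.flatMap G, (decide (key x < key y)) = true := by
        intro y hy
        rcases List.mem_flatMap.mp hy with ⟨c', hc', hyc'⟩
        have h1 : key y = c' := hG c' (by simp [hc']) y hyc'
        have h2 : c < c' := hlt c' hc'
        simp [h1, hc, h2]
      have hnS' : key x ∉ S' := fun h => absurd (hlt _ h) (by simp [hc])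
      rw [List.flatMap_cons, pv_insertBy_append_not _ _ _ _ hnot, pv_insertBy_all _ _ _ hall]
      have hrest : S'.flatMap (fun c' => G c' ++ if key x = c' then [x] else []) = S'.flatMap G :=
        List.flatMap_congr (fun c' hc' => by
          have : key x ≠ c' := fun h => hnS' (h ▸ hc')
          simp [this])
      rw [List.flatMap_cons, hrest, hc]
      simp
    · -- key x ∈ S' : c < key x, skip G c and recurse
      have hclt : c < key x := hlt _ hc
      have hnot : ∀ y ∈ G c, (decide (key x < key y)) = false := by
        intro y hy
        simp [hpre y hy, not_lt_of_gt hclt]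
      have hne : ¬ (key x = c) := fun h => absurd hclt (by simp [h])
      rw [List.flatMap_cons, pv_insertBy_append_not _ _ _ _ hnot,
          ih hSt (fun c' hc' => hG c' (by simp [hc'])) hc, List.flatMap_cons]
      simp [hne]

-- inserting x with a fresh key inserts its key into S and starts its group
theorem pv_insert_flat_new {α κ : Type} [LinearOrder κ] (key : α → κ) (x : α)
    (S : List κ) (G : κ → List α)
    (hS : S.Pairwise (· < ·)) (hG : ∀ c ∈ S, ∀ p ∈ G c, key p = c) (hnm : key x ∉ S)
    (hG0 : G (key x) = []) :
    PySem.List.insertBy (fun a b => decide (key a < key b)) x (S.flatMap G) =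
      (PySem.List.insertBy (fun a b => decide (a < b)) (key x) S).flatMap
        (fun c => G c ++ if key x = c then [x] else []) := by
  induction S with
  | nil => simp [PySem.List.insertBy, hG0]
  | cons c S' ih =>
    have hpre : ∀ p ∈ G c, key p = c := hG c (by simp)
    have hSt : S'.Pairwise (· < ·) := (List.pairwise_cons.mp hS).2
    have hlt : ∀ c' ∈ S', c < c' := (List.pairwise_cons.mp hS).1
    have hne : key x ≠ c := fun h => hnm (by simp [h])
    rcases lt_or_gt_of_ne hne with hxc | hxc
    · -- key x < c : goes in front of everything
      have hall : ∀ y ∈ (c :: S').flatMap G, (decide (key x < key y)) = true := by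
        intro y hy
        rcases List.mem_flatMap.mp hy with ⟨c', hc', hyc'⟩
        have h1 : key y = c' := hG c' hc' y hyc'
        rcases List.mem_cons.mp hc' with h | h
        · simp [h1, h, hxc]
        · have : key x < c' := lt_trans hxc (hlt c' h)
          simp [h1, this]
      rw [pv_insertBy_all _ _ _ hall]
      have hins : PySem.List.insertBy (fun a b => decide (a < b)) (key x) (c :: S') =
          key x :: c :: S' := by simp [PySem.List.insertBy, hxc]
      rw [hins]
      have hrest : (c :: S').flatMap (fun c' => G c' ++ if key x = c' then [x] else []) =
          (c :: S').flatMap G :=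
        List.flatMap_congr (fun c' hc' => by
          have : key x ≠ c' := by
            rcases List.mem_cons.mp hc' with h | h
            · exact h ▸ hne
            · exact ne_of_lt (lt_trans hxc (hlt c' h))
          simp [this])
      rw [show ((key x :: c :: S').flatMap (fun c' => G c' ++ if key x = c' then [x] else []))
            = (G (key x) ++ if key x = key x then [x] else []) ++
              (c :: S').flatMap (fun c' => G c' ++ if key x = c' then [x] else [])
          from List.flatMap_cons .., hrest, hG0]
      simp
    · -- c < key x : skip G c and recurse
      have hnot : ∀ y ∈ G c, (decide (key x < key y)) = false := by
        intro y hy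
        simp [hpre y hy, not_lt_of_gt hxc]
      have hins : PySem.List.insertBy (fun a b => decide (a < b)) (key x) (c :: S') =
          c :: PySem.List.insertBy (fun a b => decide (a < b)) (key x) S' := by
        simp [PySem.List.insertBy, not_lt_of_gt hxc]
      rw [List.flatMap_cons, pv_insertBy_append_not _ _ _ _ hnot,
          ih hSt (fun c' hc' => hG c' (by simp [hc'])) (fun h => hnm (by simp [h])), hins,
          List.flatMap_cons]
      simp [hne]

-- a stable sort by key is the concatenation, over the sorted distinct keys, of the key-classes
theorem pv_sorted_eq_flatMap {α κ : Type} [LinearOrder κ] [BEq κ] [LawfulBEq κ]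
    (key : α → κ) (xs : List α) :
    PySem.List.sorted xs key =
      (PySem.List.sorted (PySem.Set.ofList (xs.map key)) (fun c => c)).flatMap
        (fun c => xs.filter (fun p => key p == c)) := by
  induction xs using List.reverseRecOn with
  | nil => simp [PySem.List.sorted, PySem.Set.ofList]
  | append_singleton xs x ih =>
    set S := PySem.List.sorted (PySem.Set.ofList (xs.map key)) (fun c => c) with hSdef
    have hSp : S.Pairwise (· < ·) := PySem.List.sorted_ofList_pairwise_lt _
    have hGk : ∀ c ∈ S, ∀ p ∈ xs.filter (fun p => key p == c), key p = c := by
      intro c _ p hp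
      simpa using (List.mem_filter.mp hp).2
    have hmemS : ∀ c, c ∈ S ↔ c ∈ xs.map key := by
      intro c
      rw [hSdef, PySem.List.mem_sorted, PySem.Set.mem_ofList]
    have hfilt : ∀ c, (xs ++ [x]).filter (fun p => key p == c) =
        xs.filter (fun p => key p == c) ++ if key x = c then [x] else [] := by
      intro c
      rw [List.filter_append]
      congr 1
      by_cases h : key x = c <;> simp [h]
    have hadd : PySem.Set.ofList ((xs ++ [x]).map key) =
        (PySem.Set.ofList (xs.map key)).add (key x) := by
      simp only [List.map_append, PySem.Set.ofList, List.foldl_append, List.foldl_cons,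
        List.foldl_nil, List.map_cons, List.map_nil]
    rw [pv_sorted_append, ih]
    by_cases hmem : key x ∈ xs.map key
    · -- the key is already present: the distinct-key set is unchanged
      have hcont : (PySem.Set.ofList (xs.map key)).contains (key x) = true := by
        simp [PySem.Set.mem_ofList, hmem]
      have hof : PySem.Set.ofList ((xs ++ [x]).map key) = PySem.Set.ofList (xs.map key) := by
        rw [hadd, PySem.Set.add, hcont]
        simp
      rw [hof, ← hSdef,
          pv_insert_flat_mem key x S _ hSp hGk ((hmemS _).mpr hmem)]
      exact (List.flatMap_congr (fun c _ => (hfilt c).symm))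
    · -- fresh key: it is appended to the set and insertBy-placed in the sorted keys
      have hcont : (PySem.Set.ofList (xs.map key)).contains (key x) = false := by
        simp [PySem.Set.mem_ofList, hmem]
      have hof : PySem.Set.ofList ((xs ++ [x]).map key) =
          PySem.Set.ofList (xs.map key) ++ [key x] := by
        rw [hadd, PySem.Set.add, hcont]
        simp
      have hsortS : PySem.List.sorted (PySem.Set.ofList ((xs ++ [x]).map key)) (fun c => c) =
          PySem.List.insertBy (fun a b => decide (a < b)) (key x) S := by
        rw [hof, pv_sorted_append]
      have hG0 : xs.filter (fun p => key p == key x) = [] := by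
        rw [List.filter_eq_nil_iff]
        intro p hp hkp
        exact hmem (List.mem_map.mpr ⟨p, hp, (by simpa using hkp)⟩)
      rw [hsortS,
          pv_insert_flat_new key x S _ hSp hGk (fun h => hmem ((hmemS _).mp h)) hG0]
      exact (List.flatMap_congr (fun c _ => (hfilt c).symm))

-- B's selection order is the canonical form
theorem pvSel_eq_canon_aux : ∀ (n : Nat) (r : List (String × List String)), r.length ≤ n →
    pvSel r = pvCanon r := by
  intro n
  induction n with
  | zero =>
    intro r hle
    have hr : r = [] := List.length_eq_zero_iff.mp (Nat.le_zero.mp hle)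
    subst hr
    rw [pvSel_none _ rfl]
    simp [pvCanon, PySem.Set.ofList, PySem.List.sorted]
  | succ n ihn =>
    intro r hle
    cases h : PySem.List.min? (r.map (fun kv => pvCore kv.1)) (fun c => c) with
    | none =>
      cases r with
      | nil =>
        rw [pvSel_none _ rfl]
        simp [pvCanon, PySem.Set.ofList, PySem.List.sorted]
      | cons a t =>
        rw [List.map_cons, PySem.List.min?_id_cons] at h
        cases h
    | some mn =>
      rw [pvSel_some _ _ h]
      have ih : pvSel (r.filter (fun kv => !(pvCore kv.1 == mn))) =
          pvCanon (r.filter (fun kv => !(pvCore kv.1 == mn))) :=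
        ihn _ (by have := pv_filter_core_lt r mn h; omega)
      set r' := r.filter (fun kv => !(pvCore kv.1 == mn)) with hr'
      -- the sorted distinct cores of r start with mn
      set S := PySem.List.sorted (PySem.Set.ofList (r.map (fun kv => pvCore kv.1))) (fun c => c)
        with hS
      have hSp : S.Pairwise (· < ·) := PySem.List.sorted_ofList_pairwise_lt _
      have hmemS : ∀ c, c ∈ S ↔ c ∈ r.map (fun kv => pvCore kv.1) := by
        intro c
        rw [hS, PySem.List.mem_sorted, PySem.Set.mem_ofList]
      have hmnS : mn ∈ S := (hmemS mn).mpr (PySem.List.min?_mem h)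
      have hmin : ∀ c ∈ r.map (fun kv => pvCore kv.1), mn ≤ c :=
        fun c hc => PySem.List.min?_id_le h c hc
      obtain ⟨c0, t, hcons⟩ : ∃ c0 t, S = c0 :: t := by
        cases hSe : S with
        | nil => rw [hSe] at hmnS; simp at hmnS
        | cons a b => exact ⟨a, b, rfl⟩
      have hlt : ∀ c' ∈ t, c0 < c' := (List.pairwise_cons.mp (hcons ▸ hSp)).1
      have htp : t.Pairwise (· < ·) := (List.pairwise_cons.mp (hcons ▸ hSp)).2
      have hc0 : c0 = mn := by
        have h1 : mn ≤ c0 := hmin c0 ((hmemS c0).mp (hcons ▸ List.mem_cons_self))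
        rcases List.mem_cons.mp (hcons ▸ hmnS) with he | ht
        · exact he.symm
        · exact absurd (hlt mn ht) (not_lt_of_ge h1)
      -- the sorted distinct cores of r' are exactly the tail t
      have hmemT : ∀ c, c ∈ t ↔ c ∈ r'.map (fun kv => pvCore kv.1) := by
        intro c
        constructor
        · intro hc
          have hne : mn ≠ c := ne_of_lt (hc0 ▸ hlt c hc)
          have hcr : c ∈ r.map (fun kv => pvCore kv.1) :=
            (hmemS c).mp (hcons ▸ List.mem_cons_of_mem _ hc)
          rcases List.mem_map.mp hcr with ⟨kv, hkv, hckv⟩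
          exact List.mem_map.mpr ⟨kv, List.mem_filter.mpr ⟨hkv, by simp [hckv, hne.symm]⟩, hckv⟩
        · intro hc
          rcases List.mem_map.mp hc with ⟨kv, hkv, hckv⟩
          have h1 := List.mem_filter.mp hkv
          have hne : c ≠ mn := by
            have := h1.2
            simp at this
            rw [← hckv]; exact this
          have hcr : c ∈ S := (hmemS c).mpr (List.mem_map.mpr ⟨kv, h1.1, hckv⟩)
          rcases List.mem_cons.mp (hcons ▸ hcr) with he | ht
          · exact absurd (hc0 ▸ he) hne
          · exact ht
      have hT : PySem.List.sorted (PySem.Set.ofList (r'.map (fun kv => pvCore kv.1)))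
          (fun c => c) = t := by
        have hperm : t.Perm (PySem.Set.ofList (r'.map (fun kv => pvCore kv.1))) :=
          (List.perm_ext_iff_of_nodup (htp.imp ne_of_lt) (PySem.Set.nodup_ofList _)).mpr
            (fun a => by rw [PySem.Set.mem_ofList]; exact hmemT a)
        exact PySem.List.sorted_id_eq_of_perm_of_pairwise _ _ hperm (htp.imp le_of_lt)
      -- the groups of every later core are unchanged by removing mn's group
      have hgrp : ∀ c ∈ t, r'.filter (fun p => pvCore p.1 == c) =
          r.filter (fun p => pvCore p.1 == c) := by
        intro c hc
        have hne : mn ≠ c := ne_of_lt (hc0 ▸ hlt c hc)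
        rw [hr', List.filter_filter]
        apply List.filter_congr
        intro p _
        by_cases hp : pvCore p.1 = c
        · simp [hp, hne.symm]
        · simp [hp]
      rw [ih, pvCanon, pvCanon, hT, ← hS, hcons, hc0, List.flatMap_cons]
      congr 1
      exact List.flatMap_congr (fun c hc => hgrp c hc)


theorem pvSel_eq_canon (r : List (String × List String)) : pvSel r = pvCanon r :=
  pvSel_eq_canon_aux r.length r le_rfl

-- the canonical form is the stable sort of the entries by core
theorem pvCanon_eq_sorted (m : List (String × List String)) :
    pvCanon m = PySem.List.sorted m (fun kv => pvCore kv.1) := by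
  conv_rhs => rw [pv_sorted_eq_flatMap (fun kv => pvCore kv.1) m]
  rw [pvCanon]

-- ===== VERDICT (by name: the statement is the Claim_ definition above) =====
theorem sort_mcs_mapping_spec : Claim_equal_sort_mcs_mapping := by
  intro m _ hpre
  unfold Spec_sort_mcs_mapping sort_mcs_mapping sort_mcs_mapping_alt
  dsimp only
  set grouped : PySem.Dict String (List (String × List String)) :=
    m.foldl (fun d p => d.modify (pvCore p.1) [] (fun l => l ++ [p])) PySem.Dict.empty with hgr
  have hfold : grouped =
      (m.map (fun p => (pvCore p.1, p))).foldl
        (fun d q => d.modify q.1 [] (fun l => l ++ [q.2])) PySem.Dict.empty := by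
    rw [hgr, List.foldl_map]
  have hgetD : ∀ c, grouped.getD c [] = m.filter (fun p => pvCore p.1 == c) := by
    intro c
    rw [hfold, PySem.Dict.getD_foldl_modify_append]
    simp [List.filter_map, Function.comp_def]
  have hkeys : grouped.keys = PySem.Set.ofList (m.map (fun p => pvCore p.1)) := by
    rw [hgr, PySem.Dict.keys_foldl_modify_key m (fun p => pvCore p.1) [] (fun _ p l => l ++ [p])]
    rfl
  -- A's flattened reconstruction order is the canonical form
  have hL : (PySem.List.sorted grouped.keys (fun c => c)).flatMap (fun c => grouped.getD c []) =
      pvCanon m := by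
    rw [hkeys, pvCanon]
    exact (List.flatMap_congr (fun c _ => hgetD c))
  set L := pvCanon m with hLdef
  have hLsort : L = PySem.List.sorted m (fun kv => pvCore kv.1) :=
    hLdef.trans (pvCanon_eq_sorted m)
  have hLnodup : (L.map Prod.fst).Nodup := by
    have hperm : L.Perm m := hLsort ▸ PySem.List.sorted_perm m _ _
    exact (hperm.map Prod.fst).nodup_iff.mpr hpre
  have hA : (PySem.List.sorted grouped.keys (fun c => c)).foldl
      (fun acc c => (grouped.getD c []).foldl (fun acc2 p => acc2.insert p.1 p.2) acc)
      PySem.Dict.empty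
      = L.foldl (fun d p => d.insert p.1 p.2) PySem.Dict.empty := by
    rw [← hL, ← List.foldl_flatMap]
  have hitems : ∀ (l : List (String × List String)), (l.map Prod.fst).Nodup →
      (l.foldl (fun d p => d.insert p.1 p.2) (PySem.Dict.empty : PySem.Dict String (List String))).items = l := by
    intro l hnd
    rw [PySem.Dict.items_foldl_insert_fresh l Prod.fst Prod.snd _ (by simp) hnd]
    simp [PySem.Dict.empty]
  rw [hA, hitems L hLnodup, pvAltLoop_eq_sel, pvSel_eq_canon, ← hLdef, hitems L hLnodup]
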